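-- pv_equiv track=rewrite | github.com/moong94/python_team_note | Programmers/더 맵게.py | solution
-- ===== SOURCE A (Python) =====
-- import heapq
--
-- def solution(scoville, K):
--     answer = 0
--
--     heapq.heapify(scoville)
--
--     while len(scoville) > 1:
--         temp = heapq.heappop(scoville)
--         if temp >= K:
--             break
--         heapq.heappush(scoville, temp + heapq.heappop(scoville) * 2)
--         answer += 1
--     if heapq.heappop(scoville) < K:
--         return -1
--     return answer
-- ===== SOURCE B (Python) =====
-- def solution(scoville, K):
--     # Sorted-list alternative to the heap: work on a sorted copy, combine the
--     # two front elements and re-insert the mix at its sorted position.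
--     # (Unlike A, does not mutate the argument; return value is the same.)
--     s = sorted(scoville)
--     answer = 0
--     while len(s) > 1 and s[0] < K:
--         s = _insort(s[2:], s[0] + 2 * s[1])
--         answer += 1
--     return -1 if s[0] < K else answer
--
--
-- def _insort(s, x):
--     i = 0
--     while i < len(s) and s[i] < x:
--         i += 1
--     return s[:i] + [x] + s[i:]
-- ===== Notes on version B (the rewrite author's own statement) =====
-- stated objective: simpler
-- what changed: Replaced the heapq binary min-heap with a sorted list: sort once, always combine the two front elements and re-insert the mix at its sorted position; the pop/break/final-check logic collapses into one loop guard.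
import Mathlib
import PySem

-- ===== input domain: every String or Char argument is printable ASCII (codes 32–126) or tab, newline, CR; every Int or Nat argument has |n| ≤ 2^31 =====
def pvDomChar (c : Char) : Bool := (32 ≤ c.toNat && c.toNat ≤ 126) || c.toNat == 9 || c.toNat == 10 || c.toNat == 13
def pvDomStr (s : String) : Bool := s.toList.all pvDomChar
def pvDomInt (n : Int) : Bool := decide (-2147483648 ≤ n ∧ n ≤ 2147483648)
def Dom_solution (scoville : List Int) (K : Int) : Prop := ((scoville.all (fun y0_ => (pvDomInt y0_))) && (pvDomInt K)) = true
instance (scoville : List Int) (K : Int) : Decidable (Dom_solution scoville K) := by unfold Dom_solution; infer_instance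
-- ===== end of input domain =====

-- B changes the data structure: sorted list + ordered re-insertion instead of heapq.
-- A mutates scoville in place (heapify/pops); B leaves the argument untouched — the
-- equivalence proved here is about the RETURN value only.

-- ===== PORT A =====
-- A's heapq.* calls are library calls; they are ported as a functional (skew) binary
-- min-heap: heappop returns the minimum element exactly as Python's heapq does on Int
-- values, so every intermediate popped value — hence the return value — is identical.
inductive PvHeap : Type
  | nil : PvHeap
  | node : Int → PvHeap → PvHeap → PvHeap
deriving DecidableEq, Repr

def pvHsize : PvHeap → Nat
  | .nil => 0
  | .node _ l r => 1 + pvHsize l + pvHsize r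

def pvHmerge : PvHeap → PvHeap → PvHeap
  | .nil, h => h
  | h, .nil => h
  | .node a l1 r1, .node b l2 r2 =>
      if a ≤ b then .node a (pvHmerge r1 (.node b l2 r2)) l1
      else .node b (pvHmerge r2 (.node a l1 r1)) l2
termination_by h1 h2 => pvHsize h1 + pvHsize h2
decreasing_by all_goals simp [pvHsize]; all_goals omega

-- heapq.heappush
def pvHpush (h : PvHeap) (x : Int) : PvHeap := pvHmerge h (.node x .nil .nil)

-- heapq.heappop (none = IndexError on an empty heap)
def pvHpop? : PvHeap → Option (Int × PvHeap)
  | .nil => none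
  | .node v l r => some (v, pvHmerge l r)

-- heapq.heapify
def pvHeapify (xs : List Int) : PvHeap := xs.foldl pvHpush .nil

theorem pvHsize_merge (a b : PvHeap) : pvHsize (pvHmerge a b) = pvHsize a + pvHsize b := by
  fun_induction pvHmerge a b with
  | case1 => simp [pvHsize]
  | case2 => simp [pvHsize]
  | case3 a l1 r1 b l2 r2 h ih => simp [pvHsize, ih]; omega
  | case4 a l1 r1 b l2 r2 h ih => simp [pvHsize, ih]; omega

-- 'if heappop(scoville) < K: return -1 / return answer' after the loop
-- (the 'none' branch is Python's IndexError on an empty heap, excluded by Pre_solution)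
def pvAfin (h : PvHeap) (K ans : Int) : Int :=
  match pvHpop? h with
  | none => -1
  | some (m, _) => if m < K then -1 else ans

-- 'while len(scoville) > 1: …' (the inner 'none' branches are unreachable: size > 1)
def pvAloop (h : PvHeap) (K ans : Int) : Int :=
  if 1 < pvHsize h then
    match hp : pvHpop? h with
    | none => -1
    | some (temp, h1) =>
      if K ≤ temp then pvAfin h1 K ans
      else
        match hp1 : pvHpop? h1 with
        | none => -1
        | some (sec, h2) => pvAloop (pvHpush h2 (temp + sec * 2)) K (ans + 1)
  else pvAfin h K ans
termination_by pvHsize h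
decreasing_by
  rename_i hgt
  cases h with
  | nil => simp [pvHpop?] at hp
  | node v l r =>
    simp [pvHpop?] at hp
    cases h1 with
    | nil => simp [pvHpop?] at hp1
    | node w l2 r2 =>
      simp [pvHpop?] at hp1
      have h1eq : pvHsize (PvHeap.node w l2 r2) = pvHsize l + pvHsize r := by
        rw [← hp.2, pvHsize_merge]
      simp [pvHpush, pvHsize_merge, ← hp1.2, pvHsize] at *
      omega

def solution (scoville : List Int) (K : Int) : Int :=
  pvAloop (pvHeapify scoville) K 0

-- ===== PORT B =====
-- '_insort(s, x)': i = length of the '< x' prefix, then s[:i] + [x] + s[i:]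
def pvInsort (s : List Int) (x : Int) : List Int :=
  let i := (s.takeWhile (fun a => a < x)).length
  s.take i ++ [x] ++ s.drop i

-- 'while len(s) > 1 and s[0] < K: …' then 'return -1 if s[0] < K else answer'
-- (the '[]' branch is Python's IndexError on s[0], excluded by Pre_solution)
def pvBloop : List Int → Int → Int → Int
  | [], _, _ => -1
  | [a], K, ans => if a < K then -1 else ans
  | a :: b :: rest, K, ans =>
      if a < K then pvBloop (pvInsort rest (a + 2 * b)) K (ans + 1) else ans
termination_by s _ _ => s.length
decreasing_by simp [pvInsort]

def solution_alt (scoville : List Int) (K : Int) : Int :=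
  pvBloop (PySem.List.sorted scoville (fun x => x) false) K 0

-- ===== PRECONDITION & SPEC =====
-- Pre_ excludes only the empty list, on which Python A raises IndexError (heappop of
-- an empty heap); B raises there too (s[0] of an empty list).
def Pre_solution (scoville : List Int) (K : Int) : Prop := scoville ≠ []
instance (scoville : List Int) (K : Int) : Decidable (Pre_solution scoville K) := by unfold Pre_solution; infer_instance

def pvWitness_solution : List Int × Int := ([1, 2, 3, 9, 10, 12], 7)

def Spec_solution (scoville : List Int) (K : Int) (out : Int) : Prop := out = solution_alt scoville K
instance (scoville : List Int) (K : Int) (out : Int) : Decidable (Spec_solution scoville K out) := by unfold Spec_solution; infer_instance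

-- ===== CLAIM (what is proved, stated in full; the proofs are below) =====
def Claim_equal_solution : Prop := ∀ (scoville : List Int) (K : Int), Dom_solution scoville K → Pre_solution scoville K → Spec_solution scoville K (solution scoville K)

-- ===== LEMMAS AND PROOFS =====

def pvToM : PvHeap → Multiset Int
  | .nil => 0
  | .node v l r => v ::ₘ (pvToM l + pvToM r)

def pvIsHeap : PvHeap → Prop
  | .nil => True
  | .node v l r => (∀ y ∈ pvToM l, v ≤ y) ∧ (∀ y ∈ pvToM r, v ≤ y) ∧ pvIsHeap l ∧ pvIsHeap r

theorem pvToM_merge (a b : PvHeap) : pvToM (pvHmerge a b) = pvToM a + pvToM b := by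
  fun_induction pvHmerge a b with
  | case1 => simp [pvToM]
  | case2 h hne =>
    cases h with
    | nil => simp [pvToM]
    | node v l r => simp [pvToM]
  | case3 a l1 r1 b l2 r2 h ih =>
    simp only [pvToM, ih, ← Multiset.singleton_add]
    abel
  | case4 a l1 r1 b l2 r2 h ih =>
    simp only [pvToM, ih, ← Multiset.singleton_add]
    abel

theorem pvIsHeap_merge (a b : PvHeap) (ha : pvIsHeap a) (hb : pvIsHeap b) :
    pvIsHeap (pvHmerge a b) := by
  fun_induction pvHmerge a b with
  | case1 => exact hb
  | case2 => exact ha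
  | case3 a l1 r1 b l2 r2 h ih =>
    obtain ⟨hl1, hr1, hhl1, hhr1⟩ := ha
    refine ⟨?_, hl1, ih hhr1 hb, hhl1⟩
    intro y hy
    rw [pvToM_merge] at hy
    rcases Multiset.mem_add.mp hy with hy | hy
    · exact hr1 y hy
    · simp [pvToM] at hy
      rcases hy with rfl | hy | hy
      · exact h
      · exact le_trans h (hb.1 y hy)
      · exact le_trans h (hb.2.1 y hy)
  | case4 a l1 r1 b l2 r2 h ih =>
    obtain ⟨hl2, hr2, hhl2, hhr2⟩ := hb
    refine ⟨?_, hl2, ih hhr2 ha, hhl2⟩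
    have hba : b ≤ a := by omega
    intro y hy
    rw [pvToM_merge] at hy
    rcases Multiset.mem_add.mp hy with hy | hy
    · exact hr2 y hy
    · simp [pvToM] at hy
      rcases hy with rfl | hy | hy
      · exact hba
      · exact le_trans hba (ha.1 y hy)
      · exact le_trans hba (ha.2.1 y hy)

theorem pvIsHeap_push (h : PvHeap) (x : Int) (hh : pvIsHeap h) : pvIsHeap (pvHpush h x) :=
  pvIsHeap_merge h _ hh (by simp [pvIsHeap, pvToM])

theorem pvToM_push (h : PvHeap) (x : Int) : pvToM (pvHpush h x) = x ::ₘ pvToM h := by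
  simp only [pvHpush, pvToM_merge, pvToM, ← Multiset.singleton_add]
  abel

theorem pvHeapify_spec (xs : List Int) :
    pvIsHeap (pvHeapify xs) ∧ pvToM (pvHeapify xs) = ↑xs := by
  suffices h : ∀ (h0 : PvHeap), pvIsHeap h0 →
      pvIsHeap (xs.foldl pvHpush h0) ∧ pvToM (xs.foldl pvHpush h0) = ↑xs + pvToM h0 by
    have := h .nil (by trivial)
    simpa [pvHeapify, pvToM] using this
  induction xs with
  | nil => intro h0 hh; simp [hh]
  | cons x t ih =>
    intro h0 hh
    simp only [List.foldl_cons]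
    obtain ⟨h1, h2⟩ := ih (pvHpush h0 x) (pvIsHeap_push h0 x hh)
    refine ⟨h1, ?_⟩
    rw [h2, pvToM_push]
    simp only [← Multiset.cons_coe, ← Multiset.singleton_add]
    abel

theorem pvRoot_min (v : Int) (l r : PvHeap) (hh : pvIsHeap (.node v l r)) :
    ∀ y ∈ pvToM (.node v l r), v ≤ y := by
  intro y hy
  simp [pvToM] at hy
  rcases hy with rfl | hy | hy
  · exact le_refl y
  · exact hh.1 y hy
  · exact hh.2.1 y hy

theorem pvToM_card (h : PvHeap) : Multiset.card (pvToM h) = pvHsize h := by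
  induction h with
  | nil => simp [pvToM, pvHsize]
  | node v l r ihl ihr => simp [pvToM, pvHsize, ihl, ihr]; omega

theorem pvInsort_cons (a x : Int) (t : List Int) :
    pvInsort (a :: t) x = if a < x then a :: pvInsort t x else x :: a :: t := by
  by_cases h : a < x
  · simp [pvInsort, h]
  · simp [pvInsort, h]

theorem pvInsort_perm (s : List Int) (x : Int) : (pvInsort s x).Perm (x :: s) := by
  induction s with
  | nil => simp [pvInsort]
  | cons a t ih =>
    rw [pvInsort_cons]
    by_cases h : a < x
    · simp only [if_pos h]
      exact (ih.cons a).trans (List.Perm.swap x a t)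
    · simp [if_neg h]

theorem pvInsort_sorted (s : List Int) (x : Int) (hs : s.Pairwise (· ≤ ·)) :
    (pvInsort s x).Pairwise (· ≤ ·) := by
  induction s with
  | nil => simp [pvInsort]
  | cons a t ih =>
    rw [pvInsort_cons]
    obtain ⟨ha, ht⟩ := List.pairwise_cons.mp hs
    by_cases h : a < x
    · simp only [if_pos h]
      refine List.pairwise_cons.mpr ⟨?_, ih ht⟩
      intro y hy
      rcases List.mem_cons.mp ((pvInsort_perm t x).mem_iff.mp hy) with rfl | hy
      · omega
      · exact ha y hy
    · simp only [if_neg h]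
      refine List.pairwise_cons.mpr ⟨?_, hs⟩
      intro y hy
      rcases List.mem_cons.mp hy with rfl | hy
      · omega
      · have := ha y hy; omega

-- popping a nonempty heap whose multiset is the sorted m :: t yields m and leaves t
theorem pvPop_head (v : Int) (l r : PvHeap) (m : Int) (t : List Int)
    (hh : pvIsHeap (.node v l r)) (hsrt : (m :: t).Pairwise (· ≤ ·))
    (hm : pvToM (.node v l r) = ↑(m :: t)) :
    v = m ∧ pvToM (pvHmerge l r) = ↑t := by
  have hvmem : v ∈ pvToM (.node v l r) := by simp [pvToM]
  have hvs : v ∈ (↑(m :: t) : Multiset Int) := hm ▸ hvmem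
  have hmv : m ≤ v := by
    rcases List.mem_cons.mp (by simpa using hvs) with rfl | hvt
    · exact le_refl v
    · exact (List.pairwise_cons.mp hsrt).1 v hvt
  have hvm : v ≤ m := by
    apply pvRoot_min v l r hh
    rw [hm]; simp
  have hveq : v = m := le_antisymm hvm hmv
  refine ⟨hveq, ?_⟩
  have : v ::ₘ (pvToM l + pvToM r) = m ::ₘ (↑t : Multiset Int) := by
    simpa [pvToM, Multiset.cons_coe] using hm
  rw [hveq] at this
  rw [pvToM_merge]
  exact (Multiset.cons_inj_right m).mp this

theorem pvHsize_eq (h : PvHeap) (s : List Int) (hm : pvToM h = ↑s) :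
    pvHsize h = s.length := by
  rw [← pvToM_card, hm]; simp

theorem pvBloop_nil (K ans : Int) : pvBloop [] K ans = -1 := by
  rw [pvBloop.eq_def]

theorem pvBloop_single (a K ans : Int) : pvBloop [a] K ans = if a < K then -1 else ans := by
  rw [pvBloop.eq_def]

theorem pvBloop_cons (a b K ans : Int) (rest : List Int) :
    pvBloop (a :: b :: rest) K ans =
      if a < K then pvBloop (pvInsort rest (a + 2 * b)) K (ans + 1) else ans := by
  rw [pvBloop.eq_def]

-- the key correspondence: a heap and a sorted list carrying the same multiset drive
-- A's loop and B's loop to the same result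
theorem pvKey (n : Nat) : ∀ (s : List Int) (h : PvHeap) (K ans : Int),
    s.length = n → pvIsHeap h → s.Pairwise (· ≤ ·) → pvToM h = ↑s →
    pvAloop h K ans = pvBloop s K ans := by
  induction n using Nat.strong_induction_on with
  | _ n ih =>
  intro s h K ans hlen hh hs hm
  have hsz : pvHsize h = s.length := pvHsize_eq h s hm
  match s with
  | [] =>
    cases h with
    | nil => rw [pvAloop, pvBloop_nil]; simp [pvHsize, pvAfin, pvHpop?]
    | node v l r => simp [pvHsize] at hsz
  | [a] =>
    cases h with
    | nil => simp [pvToM] at hm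
    | node v l r =>
      obtain ⟨hveq, _⟩ := pvPop_head v l r a [] hh hs hm
      rw [pvAloop]
      have : ¬ 1 < pvHsize (PvHeap.node v l r) := by simp at hsz; omega
      simp only [if_neg this]
      rw [pvBloop_single]
      simp [pvAfin, pvHpop?, hveq]
  | a :: b :: rest =>
    cases h with
    | nil => simp [pvHsize] at hsz
    | node v l r =>
      obtain ⟨hveq, hm1⟩ := pvPop_head v l r a (b :: rest) hh hs hm
      have hgt : 1 < pvHsize (PvHeap.node v l r) := by simp at hsz; omega
      have hh1 : pvIsHeap (pvHmerge l r) := pvIsHeap_merge l r hh.2.2.1 hh.2.2.2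
      have hs1 : (b :: rest).Pairwise (· ≤ ·) := (List.pairwise_cons.mp hs).2
      rw [pvAloop]
      simp only [if_pos hgt, pvHpop?]
      cases hlr : pvHmerge l r with
      | nil =>
        rw [hlr] at hm1; simp [pvToM] at hm1; exact absurd hm1.symm (by simp)
      | node w l1 r1 =>
        rw [hlr] at hm1 hh1
        obtain ⟨hweq, hm2⟩ := pvPop_head w l1 r1 b rest hh1 hs1 hm1
        have hab : a ≤ b := (List.pairwise_cons.mp hs).1 b (by simp)
        by_cases hK : K ≤ v
        · simp only [if_pos hK]
          have hbB : ¬ (a < K) := by omega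
          rw [pvBloop_cons]
          simp only [if_neg hbB]
          simp [pvAfin, pvHpop?, hweq]
          omega
        · simp only [if_neg hK]
          have hrec := ih (rest.length + 1) (by simp at hlen; omega)
            (pvInsort rest (a + 2 * b)) (pvHpush (pvHmerge l1 r1) (v + w * 2)) K (ans + 1)
            (by simpa using (pvInsort_perm rest (a + 2 * b)).length_eq)
            (pvIsHeap_push _ _ (pvIsHeap_merge l1 r1 hh1.2.2.1 hh1.2.2.2))
            (pvInsort_sorted rest (a + 2 * b) (List.pairwise_cons.mp hs1).2)
            (by
              rw [pvToM_push, hm2, hveq, hweq]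
              have hp : (pvInsort rest (a + 2 * b)).Perm ((a + 2 * b) :: rest) :=
                pvInsort_perm rest (a + 2 * b)
              have : (↑(pvInsort rest (a + 2 * b)) : Multiset Int) = ↑((a + 2 * b) :: rest) :=
                Multiset.coe_eq_coe.mpr hp
              rw [this, Multiset.cons_coe]
              ring_nf)
          rw [hrec]
          have haK : a < K := by omega
          rw [pvBloop_cons]
          simp [haK]

theorem pv_main (scoville : List Int) (K : Int) (hne : scoville ≠ []) :
    solution scoville K = solution_alt scoville K := by
  obtain ⟨hh, hm⟩ := pvHeapify_spec scoville
  unfold solution solution_alt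
  apply pvKey (PySem.List.sorted scoville (fun x => x) false).length _ _ K 0 rfl hh
  · simpa using PySem.List.sorted_pairwise scoville (fun x => x)
  · rw [hm]
    exact (Multiset.coe_eq_coe.mpr (PySem.List.sorted_perm scoville (fun x => x) false)).symm

-- ===== VERDICT (by name: the statement is the Claim_ definition above) =====
theorem solution_spec : Claim_equal_solution := by
  intro scoville K _ hpre
  unfold Spec_solution
  exact pv_main scoville K hpre
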